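-- pv_equiv track=rewrite | github.com/Ggoon23/Python | A로 B만들기.py | solution
-- ===== SOURCE A (Python) =====
-- def solution(before, after):
--     a = list(after)
--     b = list(before)
--     for i in a :
--         if i in b:
--             b.remove(i)
--     if b == []:
--         return 1
--     else :
--         return 0
-- ===== SOURCE B (Python) =====
-- def solution(before, after):
--     return 1 if all(before.count(c) <= after.count(c) for c in before) else 0
-- ===== Notes on version B (the rewrite author's own statement) =====
-- stated objective: simpler
-- what changed: Replaces A's destructive scan-and-remove loop over a mutable copy of before with a non-destructive per-character count comparison (multiset-inclusion check), a one-liner with no mutation.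
import Mathlib
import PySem

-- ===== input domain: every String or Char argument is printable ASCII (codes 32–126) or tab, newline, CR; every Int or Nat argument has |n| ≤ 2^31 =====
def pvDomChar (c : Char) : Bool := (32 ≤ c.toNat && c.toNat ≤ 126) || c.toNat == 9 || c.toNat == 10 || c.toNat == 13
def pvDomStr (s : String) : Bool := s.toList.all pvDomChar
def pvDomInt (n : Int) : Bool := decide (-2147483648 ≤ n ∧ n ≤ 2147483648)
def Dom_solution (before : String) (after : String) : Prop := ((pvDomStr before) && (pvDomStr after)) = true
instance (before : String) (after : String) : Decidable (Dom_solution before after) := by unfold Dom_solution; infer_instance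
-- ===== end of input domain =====

-- B replaces A's destructive scan-and-remove loop with a non-destructive per-character
-- count comparison (multiset-inclusion check); objective: simpler. No mutation in B
-- (A mutates only local copies, so no observable side effects either way).

-- ===== PORT A =====
-- one step of A's loop body: 'if i in b: b.remove(i)'
def pvStep (bb : List Char) (i : Char) : List Char := if i ∈ bb then bb.erase i else bb

def solution (before : String) (after : String) : Int :=
  let a := after.toList
  let b := before.toList
  let b' := a.foldl pvStep b
  if b' = [] then 1 else 0

-- ===== PORT B =====
def solution_alt (before : String) (after : String) : Int :=
  if before.toList.all (fun c => decide (before.toList.count c ≤ after.toList.count c)) then 1 else 0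

-- ===== PRECONDITION & SPEC =====
def Spec_solution (before : String) (after : String) (out : Int) : Prop := out = solution_alt before after
instance (before : String) (after : String) (out : Int) : Decidable (Spec_solution before after out) := by unfold Spec_solution; infer_instance

-- ===== CLAIM (what is proved, stated in full; the proofs are below) =====
def Claim_equal_solution : Prop := ∀ (before : String) (after : String), Dom_solution before after → Spec_solution before after (solution before after)

-- ===== LEMMAS AND PROOFS =====

-- after A's loop over a, each character's count in b is what remains after truncated subtraction
theorem pv_count_foldl (a : List Char) (b : List Char) (c : Char) :
    (a.foldl pvStep b).count c = b.count c - a.count c := by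
  induction a generalizing b with
  | nil => simp
  | cons i a ih =>
    have hstep : (pvStep b i).count c =
        (if i ∈ b then b.erase i else b).count c := rfl
    rw [List.foldl_cons, ih]
    by_cases hic : c = i
    · subst hic
      by_cases hib : c ∈ b
      · have h1 : 0 < b.count c := List.count_pos_iff.mpr hib
        rw [hstep, if_pos hib, List.count_erase_self, List.count_cons_self]
        omega
      · have h0 : b.count c = 0 := List.count_eq_zero.mpr hib
        rw [hstep, if_neg hib, h0]
        simp
    · have hcnt : (pvStep b i).count c = b.count c := by
        rw [hstep]
        split
        · exact List.count_erase_of_ne hic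
        · rfl
      rw [hcnt, List.count_cons_of_ne (Ne.symm hic)]

theorem pv_empty_iff (a : List Char) (b : List Char) :
    (a.foldl pvStep b = []) ↔ ∀ c ∈ b, b.count c ≤ a.count c := by
  constructor
  · intro h c hc
    have := pv_count_foldl a b c
    rw [h] at this
    simp at this
    omega
  · intro h
    rw [List.eq_nil_iff_forall_not_mem]
    intro c hc
    have hc' : 0 < (a.foldl pvStep b).count c := List.count_pos_iff.mpr hc
    rw [pv_count_foldl] at hc'
    by_cases hcb : c ∈ b
    · have := h c hcb; omega
    · have : b.count c = 0 := List.count_eq_zero.mpr hcb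
      omega

-- ===== VERDICT (by name: the statement is the Claim_ definition above) =====
theorem solution_spec : Claim_equal_solution := by
  intro before after _
  unfold Spec_solution solution solution_alt
  simp only
  by_cases h : ∀ c ∈ before.toList, before.toList.count c ≤ after.toList.count c
  · rw [if_pos ((pv_empty_iff _ _).mpr h), if_pos]
    rw [List.all_eq_true]
    intro c hc
    exact decide_eq_true (h c hc)
  · rw [if_neg (fun he => h ((pv_empty_iff _ _).mp he)), if_neg]
    intro hall
    apply h
    intro c hc
    exact of_decide_eq_true (List.all_eq_true.mp hall c hc)
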